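-- pv_equiv track=rewrite | github.com/rlecomte1929/rolec | backend/services/case_context_service.py | _roles_overlap
-- ===== SOURCE A (Python) =====
-- from typing import Any, Dict, List, Mapping, Optional, Sequence
--
-- def _roles_overlap(applies_to_roles: Any, people: Sequence[Mapping[str, Any]]) -> bool:
--     if applies_to_roles is None:
--         return True
--     if not isinstance(applies_to_roles, list):
--         return True
--     if len(applies_to_roles) == 0:
--         return True
--     allowed = {str(r) for r in applies_to_roles}
--     for p in people:
--         role = p.get("role")
--         if role is not None and str(role) in allowed:
--             return True
--     return False
-- ===== SOURCE B (Python) =====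
-- def _roles_overlap(applies_to_roles, people):
--     if applies_to_roles is None:
--         return True
--     if not isinstance(applies_to_roles, list):
--         return True
--     if len(applies_to_roles) == 0:
--         return True
--     xs = sorted({str(r) for r in applies_to_roles})
--     ys = sorted({str(p.get("role")) for p in people if p.get("role") is not None})
--     i = 0
--     j = 0
--     while i < len(xs) and j < len(ys):
--         if xs[i] == ys[j]:
--             return True
--         if xs[i] < ys[j]:
--             i += 1
--         else:
--             j += 1
--     return False
-- ===== Notes on version B (the rewrite author's own statement) =====
-- stated objective: alternative
-- what changed: A's hash-set membership scan over people is replaced by sorting both deduplicated role lists and detecting a common element with a two-pointer merge walk; correct because two sorted lists share an element iff the merge walk meets equal heads.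
import Mathlib
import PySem

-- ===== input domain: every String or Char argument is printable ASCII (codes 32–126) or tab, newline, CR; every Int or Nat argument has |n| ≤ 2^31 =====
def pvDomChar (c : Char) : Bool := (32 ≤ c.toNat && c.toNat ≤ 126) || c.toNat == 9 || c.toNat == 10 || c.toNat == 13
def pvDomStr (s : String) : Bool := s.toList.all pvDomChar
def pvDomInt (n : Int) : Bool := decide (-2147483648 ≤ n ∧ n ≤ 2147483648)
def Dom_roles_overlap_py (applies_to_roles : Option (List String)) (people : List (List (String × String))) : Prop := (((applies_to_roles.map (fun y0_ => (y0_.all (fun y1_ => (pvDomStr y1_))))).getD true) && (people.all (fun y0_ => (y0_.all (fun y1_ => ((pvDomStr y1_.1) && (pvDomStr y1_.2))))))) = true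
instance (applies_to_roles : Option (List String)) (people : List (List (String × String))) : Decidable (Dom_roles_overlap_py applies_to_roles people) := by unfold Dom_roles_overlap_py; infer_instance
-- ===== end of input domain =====

-- B replaces A's hash-set membership scan over people by sorting both deduplicated role
-- lists and walking them with a two-pointer merge to detect a common element (alternative).

-- ===== PORT A =====
-- the 'for p in people: … return True' early-return loop of A, step for step
def rolesLoopA (allowed : PySem.Set String) : List (List (String × String)) → Bool
  | [] => false
  | p :: rest =>
    match (PySem.Dict.mk p).get? "role" with
    | some role => if PySem.Set.contains allowed role then true else rolesLoopA allowed rest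
    | none => rolesLoopA allowed rest

def roles_overlap_py (applies_to_roles : Option (List String)) (people : List (List (String × String))) : Bool :=
  match applies_to_roles with
  | none => true        -- applies_to_roles is None
  | some roles =>       -- (the 'not isinstance(…, list)' guard cannot fire: the type is a list)
    if roles.length = 0 then true
    else
      let allowed : PySem.Set String := PySem.Set.ofList roles   -- str(r) = r on strings
      rolesLoopA allowed people

-- ===== PORT B =====
-- the 'while i < len(xs) and j < len(ys)' two-pointer walk of Source B, as structural recursion
def mergeHas : List String → List String → Bool
  | [], _ => false
  | _ :: _, [] => false
  | x :: xs, y :: ys =>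
    if x = y then true
    else if x < y then mergeHas xs (y :: ys)
    else mergeHas (x :: xs) ys
termination_by xs ys => xs.length + ys.length

def roles_overlap_py_alt (applies_to_roles : Option (List String)) (people : List (List (String × String))) : Bool :=
  match applies_to_roles with
  | none => true
  | some roles =>
    if roles.length = 0 then true
    else
      let xs := PySem.List.sorted (PySem.Set.ofList roles) (fun x => x) false          -- sorted({str(r) …})
      let ys := PySem.List.sorted
        (PySem.Set.ofList (people.filterMap (fun p => (PySem.Dict.mk p).get? "role")))
        (fun x => x) false                                                              -- sorted({str(p.get("role")) …})
      mergeHas xs ys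

-- ===== PRECONDITION & SPEC =====
def Spec_roles_overlap_py (applies_to_roles : Option (List String)) (people : List (List (String × String))) (out : Bool) : Prop := out = roles_overlap_py_alt applies_to_roles people
instance (applies_to_roles : Option (List String)) (people : List (List (String × String))) (out : Bool) : Decidable (Spec_roles_overlap_py applies_to_roles people out) := by unfold Spec_roles_overlap_py; infer_instance

-- ===== CLAIM (what is proved, stated in full; the proofs are below) =====
def Claim_equal_roles_overlap_py : Prop := ∀ (applies_to_roles : Option (List String)) (people : List (List (String × String))), Dom_roles_overlap_py applies_to_roles people → Spec_roles_overlap_py applies_to_roles people (roles_overlap_py applies_to_roles people)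

-- ===== LEMMAS AND PROOFS =====
-- A's early-return loop equals an 'any' over the people's present roles
theorem rolesLoopA_eq_any (allowed : PySem.Set String) (people : List (List (String × String))) :
    rolesLoopA allowed people =
      (people.filterMap (fun p => (PySem.Dict.mk p).get? "role")).any allowed.contains := by
  induction people with
  | nil => simp [rolesLoopA]
  | cons p rest ih =>
    cases h : (PySem.Dict.mk p).get? "role" with
    | none => simp [rolesLoopA, h, ih]
    | some role =>
      simp only [rolesLoopA, h, List.filterMap_cons, List.any_cons, ih]
      cases PySem.Set.contains allowed role <;> simp

-- the merge walk on two strictly increasing lists is true iff they share an element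
theorem mergeHas_eq_true_iff (xs ys : List String)
    (hx : xs.Pairwise (· < ·)) (hy : ys.Pairwise (· < ·)) :
    mergeHas xs ys = true ↔ ∃ a ∈ xs, a ∈ ys := by
  induction xs, ys using mergeHas.induct with
  | case1 ys => simp [mergeHas]
  | case2 x xs => simp [mergeHas]
  | case3 xs y ys =>
    simp [mergeHas]
  | case4 x xs y ys hne hlt ih =>
    have hx' := List.pairwise_cons.mp hx
    simp only [mergeHas, if_neg hne, if_pos hlt, ih hx'.2 hy]
    constructor
    · rintro ⟨a, ha, hb⟩; exact ⟨a, List.mem_cons_of_mem _ ha, hb⟩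
    · rintro ⟨a, ha, hb⟩
      rcases List.mem_cons.mp ha with rfl | ha
      · rcases List.mem_cons.mp hb with rfl | hb
        · exact absurd rfl hne
        · exact absurd (lt_trans hlt ((List.pairwise_cons.mp hy).1 _ hb)) (lt_irrefl a)
      · exact ⟨a, ha, hb⟩
  | case5 x xs y ys hne hnlt ih =>
    have hy' := List.pairwise_cons.mp hy
    have hyx : y < x := lt_of_le_of_ne (not_lt.mp hnlt) (Ne.symm hne)
    simp only [mergeHas, if_neg hne, if_neg hnlt, ih hx hy'.2]
    constructor
    · rintro ⟨a, ha, hb⟩; exact ⟨a, ha, List.mem_cons_of_mem _ hb⟩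
    · rintro ⟨a, ha, hb⟩
      rcases List.mem_cons.mp hb with rfl | hb
      · rcases List.mem_cons.mp ha with rfl | ha
        · exact absurd rfl hne
        · exact absurd (lt_trans hyx ((List.pairwise_cons.mp hx).1 _ ha)) (lt_irrefl a)
      · exact ⟨a, ha, hb⟩

-- ===== VERDICT (by name: the statement is the Claim_ definition above) =====
theorem roles_overlap_py_spec : Claim_equal_roles_overlap_py := by
  intro applies_to_roles people _
  unfold Spec_roles_overlap_py roles_overlap_py roles_overlap_py_alt
  cases applies_to_roles with
  | none => rfl
  | some roles =>
    by_cases h : roles.length = 0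
    · simp [h]
    · simp only [h, if_false]
      rw [rolesLoopA_eq_any, Bool.eq_iff_iff, List.any_eq_true,
        mergeHas_eq_true_iff _ _ (PySem.List.sorted_ofList_pairwise_lt _)
          (PySem.List.sorted_ofList_pairwise_lt _)]
      constructor
      · rintro ⟨r, hr, hc⟩
        have hc' : r ∈ PySem.Set.ofList roles := (PySem.Set.contains_iff _ _).mp hc
        have hr' : r ∈ PySem.Set.ofList
            (people.filterMap (fun p => (PySem.Dict.mk p).get? "role")) :=
          (PySem.Set.mem_ofList _ _).mpr hr
        exact ⟨r, (PySem.List.mem_sorted _ _ _ _).mpr hc',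
          (PySem.List.mem_sorted _ _ _ _).mpr hr'⟩
      · rintro ⟨r, hxm, hym⟩
        have hx' : r ∈ PySem.Set.ofList roles := (PySem.List.mem_sorted _ _ _ _).mp hxm
        have hy' : r ∈ PySem.Set.ofList
            (people.filterMap (fun p => (PySem.Dict.mk p).get? "role")) :=
          (PySem.List.mem_sorted _ _ _ _).mp hym
        exact ⟨r, (PySem.Set.mem_ofList _ _).mp hy', (PySem.Set.contains_iff _ _).mpr hx'⟩
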